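-- pv_equiv track=rewrite | github.com/leandro-mana/data-algorithms-with-pyspark | src/chapter_03/examples/mappartitions_transformation.py | count_negative_zero_positive
-- ===== SOURCE A (Python) =====
-- from collections.abc import Iterable, Iterator
--
-- def count_negative_zero_positive(
--     partition: Iterable[str],
-- ) -> Iterator[tuple[int, int, int]]:
--     """
--     Count negative, zero, and positive numbers in a partition.
--
--     This demonstrates local aggregation within a partition - we process
--     all elements and emit a single summary tuple, reducing shuffle data.
--
--     Args:
--         partition: Iterator of number strings from this partition
--
--     Yields:
--         Single tuple (negative_count, zero_count, positive_count)
--     """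
--     negative = 0
--     zero = 0
--     positive = 0
--
--     for num_str in partition:
--         try:
--             num = int(num_str.strip())
--             if num < 0:
--                 negative += 1
--             elif num > 0:
--                 positive += 1
--             else:
--                 zero += 1
--         except ValueError:
--             continue  # Skip non-numeric lines
--
--     yield (negative, zero, positive)
-- ===== SOURCE B (Python) =====
-- def count_negative_zero_positive(partition):
--     # Parse first into a list of valid ints, then count by separate reductions.
--     nums = []
--     for num_str in partition:
--         try:
--             nums.append(int(num_str.strip()))
--         except ValueError:
--             continue
--     negative = sum(1 for n in nums if n < 0)
--     positive = sum(1 for n in nums if n > 0)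
--     zero = len(nums) - negative - positive
--     yield (negative, zero, positive)
-- ===== Notes on version B (the rewrite author's own statement) =====
-- stated objective: alternative
-- what changed: Replaces the single-pass three-counter accumulator loop with a parse-into-list phase followed by separate counting reductions (zero derived arithmetically as len - negative - positive).
import Mathlib
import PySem

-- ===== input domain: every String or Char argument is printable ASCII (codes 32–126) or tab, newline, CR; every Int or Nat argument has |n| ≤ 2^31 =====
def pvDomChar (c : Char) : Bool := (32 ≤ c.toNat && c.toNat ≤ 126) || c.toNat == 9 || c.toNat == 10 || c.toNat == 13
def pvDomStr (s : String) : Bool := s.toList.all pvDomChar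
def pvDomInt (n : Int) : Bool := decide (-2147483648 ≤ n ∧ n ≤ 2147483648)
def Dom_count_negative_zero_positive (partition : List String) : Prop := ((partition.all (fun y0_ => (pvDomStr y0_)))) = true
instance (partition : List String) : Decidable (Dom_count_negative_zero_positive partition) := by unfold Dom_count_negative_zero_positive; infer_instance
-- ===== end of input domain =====

-- B restructures A's one-pass three-counter loop into parse-then-count reductions; equal results proved below.
-- ===== PORT A =====
def pvGoA : List String → Int × Int × Int → Int × Int × Int
  | [], st => st
  | s :: rest, (neg, zero, pos) =>
    match PySem.Int.ofStr? (PySem.Str.strip s) with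
    | none => pvGoA rest (neg, zero, pos)       -- ValueError: continue
    | some num =>
      if num < 0 then pvGoA rest (neg + 1, zero, pos)
      else if num > 0 then pvGoA rest (neg, zero, pos + 1)
      else pvGoA rest (neg, zero + 1, pos)

def count_negative_zero_positive (partition : List String) : List (Int × Int × Int) :=
  let st := pvGoA partition (0, 0, 0)
  [(st.1, st.2.1, st.2.2)]

-- ===== PORT B =====
def count_negative_zero_positive_alt (partition : List String) : List (Int × Int × Int) :=
  let nums : List Int := partition.filterMap (fun s => PySem.Int.ofStr? (PySem.Str.strip s))
  let negative : Int := (nums.countP (fun n => n < 0) : Nat)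
  let positive : Int := (nums.countP (fun n => n > 0) : Nat)
  let zero : Int := (nums.length : Nat) - negative - positive
  [(negative, zero, positive)]

-- ===== PRECONDITION & SPEC =====
def Spec_count_negative_zero_positive (partition : List String) (out : List (Int × Int × Int)) : Prop := out = count_negative_zero_positive_alt partition
instance (partition : List String) (out : List (Int × Int × Int)) : Decidable (Spec_count_negative_zero_positive partition out) := by unfold Spec_count_negative_zero_positive; infer_instance

-- ===== CLAIM (what is proved, stated in full; the proofs are below) =====
def Claim_equal_count_negative_zero_positive : Prop := ∀ (partition : List String), Dom_count_negative_zero_positive partition → Spec_count_negative_zero_positive partition (count_negative_zero_positive partition)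

-- ===== LEMMAS AND PROOFS =====


theorem pvGoA_add (l : List String) (a b c : Int) :
    pvGoA l (a, b, c) =
      (a + (l.filterMap (fun s => PySem.Int.ofStr? (PySem.Str.strip s))).countP (fun n => n < 0),
       b + (l.filterMap (fun s => PySem.Int.ofStr? (PySem.Str.strip s))).countP (fun n => n = 0),
       c + (l.filterMap (fun s => PySem.Int.ofStr? (PySem.Str.strip s))).countP (fun n => n > 0)) := by
  induction l generalizing a b c with
  | nil => simp [pvGoA]
  | cons s rest ih =>
    simp only [pvGoA, List.filterMap_cons]
    cases h : PySem.Int.ofStr? (PySem.Str.strip s) with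
    | none => simp [ih]
    | some n =>
      by_cases h1 : n < 0
      · have hz : ¬ n = 0 := by omega
        have hp : ¬ n > 0 := by omega
        simp only [h1, if_true, ih, List.countP_cons, decide_eq_true_eq, hz, hp, if_false,
          decide_false]
        refine Prod.ext ?_ (Prod.ext ?_ ?_) <;> push_cast <;> ring
      · by_cases h2 : n > 0
        · have hz : ¬ n = 0 := by omega
          simp only [h1, h2, if_true, if_false, ih, List.countP_cons, decide_eq_true_eq, hz,
            decide_false]
          refine Prod.ext ?_ (Prod.ext ?_ ?_) <;> push_cast <;> ring
        · have hz : n = 0 := by omega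
          simp only [ih, List.countP_cons, decide_eq_true_eq, hz, if_true, decide_true]
          refine Prod.ext ?_ (Prod.ext ?_ ?_) <;> push_cast <;> ring

theorem countP_split (l : List Int) :
    l.countP (fun n => n < 0) + l.countP (fun n => n = 0) + l.countP (fun n => n > 0)
      = l.length := by
  induction l with
  | nil => simp
  | cons n rest ih =>
    simp only [List.countP_cons, List.length_cons]
    split_ifs <;> simp_all <;> omega

theorem count_negative_zero_positive_spec : Claim_equal_count_negative_zero_positive := by
  intro partition _
  show _ = _
  simp only [count_negative_zero_positive, count_negative_zero_positive_alt, pvGoA_add]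
  have h := countP_split (partition.filterMap (fun s => PySem.Int.ofStr? (PySem.Str.strip s)))
  simp only [List.cons.injEq, Prod.mk.injEq, and_true]
  refine ⟨by ring, ?_, by ring⟩
  omega
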